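-- pv_equiv track=rewrite | github.com/Ader-EX/qiu-befast | utils.py | resolve_css_vars
-- ===== SOURCE A (Python) =====
-- def resolve_css_vars(css: str) -> str:
--     css_vars = {
--         '--ink': '#020617',
--         '--muted': '#64748B',
--         '--brand': '#FC440E',
--         '--brand-12': 'rgba(251,68,15,0.12)',
--         '--line': '#E2E8F0',
--         '--danger': '#DC2626',
--         '--bg': '#fff',
--     }
--     for var_name, value in css_vars.items():
--         css = css.replace(f"var({var_name})", value)
--     return css
-- ===== SOURCE B (Python) =====
-- def resolve_css_vars(css: str) -> str:
--     table = {
--         'var(--ink)': '#020617',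
--         'var(--muted)': '#64748B',
--         'var(--brand)': '#FC440E',
--         'var(--brand-12)': 'rgba(251,68,15,0.12)',
--         'var(--line)': '#E2E8F0',
--         'var(--danger)': '#DC2626',
--         'var(--bg)': '#fff',
--     }
--     out = []
--     i = 0
--     n = len(css)
--     while i < n:
--         for key, val in table.items():
--             if css.startswith(key, i):
--                 out.append(val)
--                 i += len(key)
--                 break
--         else:
--             out.append(css[i])
--             i += 1
--     return ''.join(out)
-- ===== Notes on version B (the rewrite author's own statement) =====
-- stated objective: alternative
-- what changed: Single left-to-right scan over the input that emits the replacement whenever one of the seven literal CSS-variable keys starts at the current position, instead of seven successive full-string str.replace passes building six intermediate strings.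
import Mathlib
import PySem

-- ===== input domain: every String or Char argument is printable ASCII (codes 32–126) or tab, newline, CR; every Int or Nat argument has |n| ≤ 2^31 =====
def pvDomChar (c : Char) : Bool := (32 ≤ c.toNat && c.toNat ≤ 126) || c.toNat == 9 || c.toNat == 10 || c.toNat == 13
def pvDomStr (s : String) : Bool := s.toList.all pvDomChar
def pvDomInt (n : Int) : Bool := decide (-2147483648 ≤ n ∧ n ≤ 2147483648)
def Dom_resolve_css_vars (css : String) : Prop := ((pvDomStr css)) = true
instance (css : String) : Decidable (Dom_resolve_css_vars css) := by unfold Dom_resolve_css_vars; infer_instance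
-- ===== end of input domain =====

-- B replaces A's seven successive full-string str.replace passes by a single left-to-right
-- scan that emits the replacement wherever one of the seven literal variable keys starts;
-- objective: alternative (same asymptotic cost, one pass instead of seven).

-- ===== PORT A =====
def resolve_css_vars (css : String) : String :=
  let css_vars : PySem.Dict String String := PySem.Dict.ofList
    [("--ink", "#020617"), ("--muted", "#64748B"), ("--brand", "#FC440E"),
     ("--brand-12", "rgba(251,68,15,0.12)"), ("--line", "#E2E8F0"),
     ("--danger", "#DC2626"), ("--bg", "#fff")]
  css_vars.items.foldl (fun css p => PySem.Str.replace css ("var(" ++ p.1 ++ ")") p.2) css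

-- ===== PORT B =====
-- B's lookup table, keyed by the full literal key strings (as char lists).
def cssTable : List (List Char × List Char) :=
  [("var(--ink)".toList, "#020617".toList),
   ("var(--muted)".toList, "#64748B".toList),
   ("var(--brand)".toList, "#FC440E".toList),
   ("var(--brand-12)".toList, "rgba(251,68,15,0.12)".toList),
   ("var(--line)".toList, "#E2E8F0".toList),
   ("var(--danger)".toList, "#DC2626".toList),
   ("var(--bg)".toList, "#fff".toList)]

-- B's while-loop over positions i < n: fuel = number of remaining loop iterations
-- (each iteration consumes at least one character); the 'for key … break / else' is find?.
def scanGo : Nat → List Char → List Char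
  | _, [] => []
  | 0, l => l
  | fuel + 1, c :: t =>
    match cssTable.find? (fun p => p.1.isPrefixOf (c :: t)) with
    | some p => p.2 ++ scanGo fuel (List.drop p.1.length (c :: t))
    | none => c :: scanGo fuel t

def resolve_css_vars_alt (css : String) : String :=
  String.ofList (scanGo css.toList.length css.toList)

-- ===== PRECONDITION & SPEC =====
def Spec_resolve_css_vars (css : String) (out : String) : Prop := out = resolve_css_vars_alt css
instance (css : String) (out : String) : Decidable (Spec_resolve_css_vars css out) := by unfold Spec_resolve_css_vars; infer_instance

-- ===== CLAIM (what is proved, stated in full; the proofs are below) =====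
def Claim_equal_resolve_css_vars : Prop := ∀ (css : String), Dom_resolve_css_vars css → Spec_resolve_css_vars css (resolve_css_vars css)

-- ===== LEMMAS AND PROOFS =====

-- One str.replace pass, as structural recursion on the string (old ≠ [] in all uses).
def repl1 (old new : List Char) : List Char → List Char
  | [] => []
  | c :: t =>
    if old.isPrefixOf (c :: t) then new ++ repl1 old new (t.drop (old.length - 1))
    else c :: repl1 old new t
termination_by l => l.length
decreasing_by
  · simp only [List.length_drop, List.length_cons]; omega
  · simp only [List.length_cons]; omega

-- The scan, as structural recursion (fuel-free counterpart of scanGo).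
def scan1 : List Char → List Char
  | [] => []
  | c :: t =>
    match cssTable.find? (fun p => p.1.isPrefixOf (c :: t)) with
    | some p => p.2 ++ scan1 (t.drop (p.1.length - 1))
    | none => c :: scan1 t
termination_by l => l.length
decreasing_by
  · simp only [List.length_drop, List.length_cons]; omega
  · simp only [List.length_cons]; omega

-- A's sequence of replace passes over a list of (old, new) pairs.
def chain (ps : List (List Char × List Char)) (l : List Char) : List Char :=
  ps.foldl (fun s p => repl1 p.1 p.2 s) l

-- ---- decidable facts about the literal table ----

lemma table_key_ne_nil : ∀ p ∈ cssTable, p.1 ≠ [] := by decide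

lemma table_key_head : ∀ p ∈ cssTable, p.1.head? = some 'v' := by decide

lemma table_key_tail_no_v : ∀ p ∈ cssTable, 'v' ∉ p.1.tail := by decide

lemma table_val_no_v : ∀ p ∈ cssTable, 'v' ∉ p.2 := by decide

lemma table_keys_incomparable : ∀ p ∈ cssTable, ∀ p' ∈ cssTable, p.1 ≠ p'.1 → ¬ p.1 <+: p'.1 := by
  decide

-- no nonempty suffix of a key's tail is prefix-comparable with any value
lemma table_tail_suffix_val_incomparable :
    ∀ p ∈ cssTable, ∀ p' ∈ cssTable, ∀ q ∈ List.range p.1.tail.length,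
      ¬ (p.1.tail.drop q <+: p'.2) ∧ ¬ (p'.2 <+: p.1.tail.drop q) := by
  decide

-- ---- generic prefix helpers ----

lemma prefix_head?_eq {k z : List Char} (h : k <+: z) (hk : k ≠ []) : z.head? = k.head? := by
  obtain ⟨w, rfl⟩ := h
  cases k with
  | nil => exact absurd rfl hk
  | cons a t => rfl

-- ---- A's PySem replace equals repl1 ----

lemma go_eq (old new : List Char) (hold : old ≠ []) :
    ∀ fuel l acc, l.length ≤ fuel →
      PySem.Chars.replace.go old new fuel l acc = acc.reverse ++ repl1 old new l := by
  intro fuel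
  induction fuel with
  | zero =>
    intro l acc hl
    have : l = [] := by cases l <;> simp_all
    subst this
    simp [PySem.Chars.replace.go, repl1]
  | succ fuel ih =>
    intro l acc hl
    cases l with
    | nil => simp [PySem.Chars.replace.go, repl1]
    | cons c t =>
      obtain ⟨o, os, rfl⟩ : ∃ o os, old = o :: os := by
        cases old with
        | nil => exact absurd rfl hold
        | cons o os => exact ⟨o, os, rfl⟩
      have hl' : t.length ≤ fuel := by simpa using hl
      rw [PySem.Chars.replace.go]
      by_cases hpre : (o :: os).isPrefixOf (c :: t) = true
      · simp only [hpre, if_pos]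
        rw [ih]
        · rw [repl1]
          simp only [hpre, if_pos]
          simp
        · simp only [List.length_drop, List.length_cons]
          omega
      · simp only [hpre]
        rw [if_neg (by simp), ih t (c :: acc) hl']
        rw [repl1]
        rw [if_neg hpre]
        simp

lemma replace_eq_repl1 (old new l : List Char) (hold : old ≠ []) :
    PySem.Chars.replace l old new = repl1 old new l := by
  rw [PySem.Chars.replace, if_neg (by simpa using hold)]
  simpa using go_eq old new hold l.length l [] le_rfl

-- ---- B's scanGo equals scan1 ----

lemma scanGo_eq : ∀ fuel l, l.length ≤ fuel → scanGo fuel l = scan1 l := by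
  intro fuel
  induction fuel with
  | zero =>
    intro l hl
    have : l = [] := by cases l <;> simp_all
    subst this; simp [scanGo, scan1]
  | succ fuel ih =>
    intro l hl
    cases l with
    | nil => simp [scanGo, scan1]
    | cons c t =>
      have hl' : t.length ≤ fuel := by simpa using hl
      rw [scanGo, scan1]
      cases hf : cssTable.find? (fun p => p.1.isPrefixOf (c :: t)) with
      | none => rw [ih t hl']
      | some p =>
        have hmem := List.mem_of_find?_eq_some hf
        obtain ⟨o, os, ho⟩ : ∃ o os, p.1 = o :: os := by
          cases hk : p.1 with
          | nil => exact absurd hk (table_key_ne_nil p hmem)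
          | cons o os => exact ⟨o, os, rfl⟩
        show p.2 ++ scanGo fuel (List.drop p.1.length (c :: t)) =
          p.2 ++ scan1 (List.drop (p.1.length - 1) t)
        rw [ih]
        · congr 1
          rw [ho]
          simp
        · rw [ho]
          simp only [List.length_cons, List.drop_succ_cons, List.length_drop]
          omega

-- ---- pushing one replace pass through a block it cannot match in ----

lemma pushblock (k v : List Char) :
    ∀ b s, (∀ q, q < b.length → ¬ k <+: (b.drop q ++ s)) →
      repl1 k v (b ++ s) = b ++ repl1 k v s := by
  intro b
  induction b with
  | nil => intro s _; rfl
  | cons c b ih =>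
    intro s h
    have h0 : ¬ k <+: (c :: b) ++ s := by simpa using h 0 (by simp)
    have : (c :: b) ++ s = c :: (b ++ s) := rfl
    rw [this, repl1, if_neg (by simpa [List.isPrefixOf_iff_prefix] using h0)]
    rw [ih s (fun q hq => by simpa using h (q+1) (by simpa using hq))]
    rfl

-- a replace pass either leaves the string unchanged or splits at its first match
lemma repl1_decomp (old new : List Char) (hold : old ≠ []) :
    ∀ t, repl1 old new t = t ∨
      ∃ pre rest, t = pre ++ old ++ rest ∧
        repl1 old new t = pre ++ new ++ repl1 old new rest := by
  intro t
  generalize hn : t.length = n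
  induction n using Nat.strong_induction_on generalizing t with
  | _ n ih =>
  subst hn
  cases t with
  | nil => left; rw [repl1]
  | cons c t =>
    obtain ⟨o, os, rfl⟩ : ∃ o os, old = o :: os := by
      cases old with
      | nil => exact absurd rfl hold
      | cons o os => exact ⟨o, os, rfl⟩
    rw [repl1]
    by_cases hpre : (o :: os).isPrefixOf (c :: t) = true
    · rw [if_pos hpre]
      right
      refine ⟨[], t.drop ((o :: os).length - 1), ?_, ?_⟩
      · have := (List.isPrefixOf_iff_prefix).1 hpre
        obtain ⟨w, hw⟩ := this
        simp only [List.nil_append]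
        rw [← hw]
        congr 1
        have : w = List.drop (o :: os).length ((o :: os) ++ w) := by simp
        rw [this, hw]
        simp
      · simp
    · rw [if_neg hpre]
      rcases ih t.length (by simp) t rfl with h | ⟨pre, rest, ht, hr⟩
      · left; rw [h]
      · right
        exact ⟨c :: pre, rest, by simp [ht], by simp [hr]⟩

-- ---- no key can match starting inside a value or inside another key ----

lemma no_match_into_val (p' : List Char × List Char) (hp' : p' ∈ cssTable)
    (u : List Char) (hu : 'v' ∉ u) (s : List Char) :
    ∀ q, q < u.length → ¬ p'.1 <+: (u.drop q ++ s) := by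
  intro q hq hpre
  obtain ⟨o, os, ho⟩ : ∃ o os, p'.1 = o :: os := by
    cases hk : p'.1 with
    | nil => exact absurd hk (table_key_ne_nil p' hp')
    | cons o os => exact ⟨o, os, rfl⟩
  have hhd := prefix_head?_eq hpre (by rw [ho]; simp)
  have h1 : (u.drop q ++ s).head? = some 'v' := by
    rw [hhd, ho]
    have := table_key_head p' hp'
    rw [ho] at this
    simpa using this
  have h2 : (u.drop q).head? = u[q]? := List.head?_drop
  have h3 : u[q]? = some u[q] := List.getElem?_eq_getElem hq
  have hne : u.drop q ≠ [] := by
    intro hc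
    have : u.length - q = 0 := by simpa using congrArg List.length hc
    omega
  rw [List.head?_append_of_ne_nil _ hne, h2, h3] at h1
  have : u[q] = 'v' := by simpa using h1
  exact hu (this ▸ List.getElem_mem hq)

lemma no_match_into_key (p0 : List Char × List Char) (hp0 : p0 ∈ cssTable)
    (p' : List Char × List Char) (hp' : p' ∈ cssTable) (hne : p'.1 ≠ p0.1) (s : List Char) :
    ∀ q, q < p0.1.length → ¬ p'.1 <+: (p0.1.drop q ++ s) := by
  intro q hq hpre
  rcases Nat.eq_zero_or_pos q with rfl | hqpos
  · simp only [List.drop_zero] at hpre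
    have hkm : p0.1 <+: p0.1 ++ s := List.prefix_append _ _
    rcases List.prefix_or_prefix_of_prefix hpre hkm with hc | hc
    · exact table_keys_incomparable p' hp' p0 hp0 hne hc
    · exact table_keys_incomparable p0 hp0 p' hp' (fun h => hne h.symm) hc
  · have hhd := prefix_head?_eq hpre (table_key_ne_nil p' hp')
    have hne' : p0.1.drop q ≠ [] := by
      intro hc
      have : p0.1.length - q = 0 := by simpa using congrArg List.length hc
      omega
    rw [List.head?_append_of_ne_nil _ hne', List.head?_drop,
      table_key_head p' hp', List.getElem?_eq_getElem hq] at hhd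
    have hv : p0.1[q] = 'v' := by simpa using hhd
    have hqlt : q - 1 < (p0.1.drop 1).length := by
      simp only [List.length_drop]
      omega
    have htl : p0.1[q] = (p0.1.drop 1)[q-1]'hqlt := by
      rw [List.getElem_drop]
      congr 1
      omega
    have hmem' : p0.1[q] ∈ p0.1.tail := by
      rw [← List.drop_one, htl]
      exact List.getElem_mem hqlt
    exact table_key_tail_no_v p0 hp0 (hv ▸ hmem')

-- invariant preservation: a pass cannot create a key occurrence at the head
lemma pres (c : Char) (t : List Char) (p : List Char × List Char) (hp : p ∈ cssTable)
    (H : ∀ p' ∈ cssTable, ¬ p'.1 <+: c :: t) :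
    ∀ p' ∈ cssTable, ¬ p'.1 <+: c :: repl1 p.1 p.2 t := by
  intro p' hp' hpre
  rcases repl1_decomp p.1 p.2 (table_key_ne_nil p hp) t with h | ⟨pre, rest, ht, hr⟩
  · rw [h] at hpre
    exact H p' hp' hpre
  · rw [hr] at hpre
    obtain ⟨o, ki', ho⟩ : ∃ o os, p'.1 = o :: os := by
      cases hk : p'.1 with
      | nil => exact absurd hk (table_key_ne_nil p' hp')
      | cons o os => exact ⟨o, os, rfl⟩
    rw [ho] at hpre
    rw [List.cons_prefix_cons] at hpre
    obtain ⟨hco, hki⟩ := hpre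
    rw [List.append_assoc] at hki
    have hprepre : pre <+: pre ++ (p.2 ++ repl1 p.1 p.2 rest) := List.prefix_append _ _
    rcases List.prefix_or_prefix_of_prefix hki hprepre with hcase | hcase
    · have : ki' <+: t := by
        rw [ht]
        calc ki' <+: pre := hcase
        _ <+: pre ++ (p.1 ++ rest) := List.prefix_append _ _
        _ = pre ++ p.1 ++ rest := by rw [List.append_assoc]
      exact H p' hp' (by rw [ho, hco]; exact List.cons_prefix_cons.2 ⟨rfl, this⟩)
    · by_cases hlen : ki'.length ≤ pre.length
      · have heq : pre = ki' := List.IsPrefix.eq_of_length_le hcase hlen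
        have hpt : pre <+: t := by
          rw [ht]
          exact (List.prefix_append pre p.1).trans (List.prefix_append (pre ++ p.1) rest)
        have this' : ki' <+: t := heq ▸ hpt
        exact H p' hp' (by rw [ho, hco]; exact List.cons_prefix_cons.2 ⟨rfl, this'⟩)
      · obtain ⟨m, hm⟩ := hcase
        have hmlen : m ≠ [] := by
          intro hc
          rw [hc] at hm
          have := congrArg List.length hm
          simp at this
          omega
        have hmpre : m <+: p.2 ++ repl1 p.1 p.2 rest := by
          rw [← hm] at hki
          exact (List.prefix_append_right_inj pre).1 hki
        have hv2 : p.2 <+: p.2 ++ repl1 p.1 p.2 rest := List.prefix_append _ _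
        rcases List.prefix_or_prefix_of_prefix hmpre hv2 with hc2 | hc2
        · have hq : pre.length ∈ List.range p'.1.tail.length := by
            rw [ho]
            simp only [List.tail_cons, List.mem_range]
            omega
          have hdrop : p'.1.tail.drop pre.length = m := by
            rw [ho]
            simp only [List.tail_cons]
            rw [← hm, List.drop_left]
          exact (table_tail_suffix_val_incomparable p' hp' p hp pre.length hq).1 (hdrop ▸ hc2)
        · have hq : pre.length ∈ List.range p'.1.tail.length := by
            rw [ho]
            simp only [List.tail_cons, List.mem_range]
            omega
          have hdrop : p'.1.tail.drop pre.length = m := by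
            rw [ho]
            simp only [List.tail_cons]
            rw [← hm, List.drop_left]
          exact (table_tail_suffix_val_incomparable p' hp' p hp pre.length hq).2 (hdrop ▸ hc2)

-- ---- lifting to the whole chain of passes ----

lemma chain_nil : ∀ ps, chain ps [] = [] := by
  intro ps
  induction ps with
  | nil => rfl
  | cons p ps ih => simpa [chain, repl1] using ih

lemma chain_no_match (c : Char) :
    ∀ ps, (∀ p ∈ ps, p ∈ cssTable) → ∀ t, (∀ p ∈ cssTable, ¬ p.1 <+: c :: t) →
      chain ps (c :: t) = c :: chain ps t ∧ ∀ p ∈ cssTable, ¬ p.1 <+: c :: chain ps t := by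
  intro ps
  induction ps with
  | nil => intro _ t H; exact ⟨rfl, H⟩
  | cons p ps ih =>
    intro hsub t H
    have hp : p ∈ cssTable := hsub p (by simp)
    have h1 : repl1 p.1 p.2 (c :: t) = c :: repl1 p.1 p.2 t := by
      rw [repl1, if_neg (by simpa [List.isPrefixOf_iff_prefix] using H p hp)]
    have H' := pres c t p hp H
    have := ih (fun q hq => hsub q (by simp [hq])) (repl1 p.1 p.2 t) H'
    refine ⟨?_, this.2⟩
    show chain ps (repl1 p.1 p.2 (c :: t)) = c :: chain ps (repl1 p.1 p.2 t)
    rw [h1]; exact this.1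

lemma chain_push_v :
    ∀ ps, (∀ p ∈ ps, p ∈ cssTable) → ∀ u, 'v' ∉ u → ∀ s,
      chain ps (u ++ s) = u ++ chain ps s := by
  intro ps
  induction ps with
  | nil => intro _ u _ s; rfl
  | cons p ps ih =>
    intro hsub u hu s
    have hp : p ∈ cssTable := hsub p (by simp)
    show chain ps (repl1 p.1 p.2 (u ++ s)) = u ++ chain ps (repl1 p.1 p.2 s)
    rw [pushblock p.1 p.2 u s (no_match_into_val p hp u hu s)]
    exact ih (fun q hq => hsub q (by simp [hq])) u hu _

lemma chain_push_k (p0 : List Char × List Char) (hp0 : p0 ∈ cssTable) :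
    ∀ ps, (∀ p ∈ ps, p ∈ cssTable ∧ p.1 ≠ p0.1) → ∀ s,
      chain ps (p0.1 ++ s) = p0.1 ++ chain ps s := by
  intro ps
  induction ps with
  | nil => intro _ s; rfl
  | cons p ps ih =>
    intro hsub s
    obtain ⟨hp, hpne⟩ := hsub p (by simp)
    show chain ps (repl1 p.1 p.2 (p0.1 ++ s)) = p0.1 ++ chain ps (repl1 p.1 p.2 s)
    rw [pushblock p.1 p.2 p0.1 s (no_match_into_key p0 hp0 p hp hpne s)]
    exact ih (fun q hq => hsub q (by simp [hq])) _

-- matched key at the head: the matching pass fires there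
lemma repl1_self (k v s : List Char) (hk : k ≠ []) :
    repl1 k v (k ++ s) = v ++ repl1 k v s := by
  obtain ⟨o, os, rfl⟩ : ∃ o os, k = o :: os := by
    cases k with
    | nil => exact absurd rfl hk
    | cons o os => exact ⟨o, os, rfl⟩
  rw [List.cons_append, repl1, if_pos]
  · congr 1
    simp
  · rw [List.isPrefixOf_iff_prefix]
    exact List.cons_prefix_cons.2 ⟨rfl, List.prefix_append _ _⟩

-- ---- main equivalence on char lists ----

lemma main_eq : ∀ n l, l.length ≤ n → chain cssTable l = scan1 l := by
  intro n
  induction n with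
  | zero =>
    intro l hl
    have : l = [] := by cases l <;> simp_all
    subst this; rw [chain_nil]; simp [scan1]
  | succ n ih =>
    intro l hl
    cases l with
    | nil => rw [chain_nil]; simp [scan1]
    | cons c t =>
      have hlt : t.length ≤ n := by simpa using hl
      rw [scan1]
      cases hf : cssTable.find? (fun p => p.1.isPrefixOf (c :: t)) with
      | none =>
        have H : ∀ p ∈ cssTable, ¬ p.1 <+: c :: t := by
          intro p hp
          have := (List.find?_eq_none).1 hf p hp
          simpa [List.isPrefixOf_iff_prefix] using this
        rw [(chain_no_match c cssTable (fun _ hp => hp) t H).1, ih t hlt]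
      | some p =>
        have hmem := List.mem_of_find?_eq_some hf
        obtain ⟨hpb, pre, post, htab, hprev⟩ := List.find?_eq_some_iff_append.1 hf
        have hpre : p.1 <+: c :: t := by
          simpa [List.isPrefixOf_iff_prefix] using hpb
        obtain ⟨rest, hrest⟩ := hpre
        obtain ⟨o, os, ho⟩ : ∃ o os, p.1 = o :: os := by
          cases hk : p.1 with
          | nil => exact absurd hk (table_key_ne_nil p hmem)
          | cons o os => exact ⟨o, os, rfl⟩
        have hrt : rest = t.drop (p.1.length - 1) := by
          rw [ho] at hrest ⊢
          simp only [List.cons_append, List.cons.injEq] at hrest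
          obtain ⟨-, h2⟩ := hrest
          rw [← h2]
          simp
        have hsubpre : ∀ p' ∈ pre, p' ∈ cssTable ∧ p'.1 ≠ p.1 := by
          intro p' hp'
          refine ⟨by rw [htab]; simp [hp'], ?_⟩
          intro he
          have := hprev p' hp'
          rw [Bool.not_eq_eq_eq_not, Bool.not_true] at this
          rw [he] at this
          rw [this] at hpb
          exact Bool.false_ne_true hpb
        have hsubpost : ∀ p' ∈ post, p' ∈ cssTable := by
          intro p' hp'
          rw [htab]; simp [hp']
        have hchain : chain cssTable (c :: t) = p.2 ++ chain cssTable rest := by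
          have hct : c :: t = p.1 ++ rest := hrest.symm
          rw [hct, htab]
          show chain (pre ++ p :: post) (p.1 ++ rest) = p.2 ++ chain (pre ++ p :: post) rest
          rw [chain, chain, List.foldl_append, List.foldl_append]
          show chain (p :: post) (chain pre (p.1 ++ rest)) = p.2 ++ chain (p :: post) (chain pre rest)
          rw [chain_push_k p hmem pre hsubpre rest]
          show chain post (repl1 p.1 p.2 (p.1 ++ chain pre rest)) =
            p.2 ++ chain post (repl1 p.1 p.2 (chain pre rest))
          rw [repl1_self p.1 p.2 _ (table_key_ne_nil p hmem)]
          exact chain_push_v post hsubpost p.2 (table_val_no_v p hmem) _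
        rw [hchain]
        have hrlen : rest.length ≤ n := by
          have := congrArg List.length hrest
          rw [ho] at this
          simp at this
          simp at hl
          omega
        rw [ih rest hrlen, hrt]

-- ---- bridging the two ports to chain/scan1 ----

lemma portA_toList (css : String) : (resolve_css_vars css).toList = chain cssTable css.toList := by
  show ((PySem.Dict.ofList
      [("--ink", "#020617"), ("--muted", "#64748B"), ("--brand", "#FC440E"),
       ("--brand-12", "rgba(251,68,15,0.12)"), ("--line", "#E2E8F0"),
       ("--danger", "#DC2626"), ("--bg", "#fff")] : PySem.Dict String String).items.foldl
      (fun css p => PySem.Str.replace css ("var(" ++ p.1 ++ ")") p.2) css).toList =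
    chain cssTable css.toList
  have hitems : ((PySem.Dict.ofList
      [("--ink", "#020617"), ("--muted", "#64748B"), ("--brand", "#FC440E"),
       ("--brand-12", "rgba(251,68,15,0.12)"), ("--line", "#E2E8F0"),
       ("--danger", "#DC2626"), ("--bg", "#fff")] : PySem.Dict String String).items =
      [("--ink", "#020617"), ("--muted", "#64748B"), ("--brand", "#FC440E"),
       ("--brand-12", "rgba(251,68,15,0.12)"), ("--line", "#E2E8F0"),
       ("--danger", "#DC2626"), ("--bg", "#fff")]) := by decide
  rw [hitems]
  simp only [List.foldl_cons, List.foldl_nil]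
  simp only [PySem.Str.toList_replace]
  simp only [chain, cssTable, List.foldl_cons, List.foldl_nil]
  rw [replace_eq_repl1 _ _ _ (by decide), replace_eq_repl1 _ _ _ (by decide),
    replace_eq_repl1 _ _ _ (by decide), replace_eq_repl1 _ _ _ (by decide),
    replace_eq_repl1 _ _ _ (by decide), replace_eq_repl1 _ _ _ (by decide),
    replace_eq_repl1 _ _ _ (by decide)]
  rfl

-- ===== VERDICT (by name: the statement is the Claim_ definition above) =====
theorem resolve_css_vars_spec : Claim_equal_resolve_css_vars := by
  intro css _
  show resolve_css_vars css = resolve_css_vars_alt css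
  calc resolve_css_vars css
      = String.ofList ((resolve_css_vars css).toList) := String.ofList_toList.symm
    _ = String.ofList (chain cssTable css.toList) := by rw [portA_toList]
    _ = String.ofList (scan1 css.toList) := by
        rw [main_eq css.toList.length css.toList le_rfl]
    _ = resolve_css_vars_alt css := by
        rw [resolve_css_vars_alt, scanGo_eq _ _ le_rfl]
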